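-- pv_equiv track=rewrite | github.com/aeferreira/metabolinks | annotations.py | get_kegg_section
-- ===== SOURCE A (Python) =====
-- def get_kegg_section(k_record, sname):
--     """Get the section with name _sname_ from a kegg compound record.
--
--        Returns a str, possibly empty."""
--
--     in_section = False
--     section = []
--
--     for line in k_record.splitlines():
--         if line.startswith(sname):
--             in_section = True
--             section.append(line)
--         elif in_section and line.startswith(' '):
--             section.append(line)
--         elif in_section and not line.startswith(' '):
--             break
--
--     sectionlines = [line[12:] for line in section]
--     return '\n'.join(sectionlines)
-- ===== SOURCE B (Python) =====
-- def get_kegg_section(k_record, sname):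
--     """Get the section with name _sname_ from a kegg compound record.
--
--        Returns a str, possibly empty."""
--
--     # Phase 1: parse the record into sections, each a header line followed by
--     # its run of space-indented continuation lines.
--     lines = k_record.splitlines()
--     sections = []
--     i = 0
--     while i < len(lines):
--         j = i + 1
--         while j < len(lines) and lines[j].startswith(' '):
--             j += 1
--         sections.append(lines[i:j])
--         i = j
--
--     # Phase 2: concatenate the leading run of sections whose header matches.
--     block = []
--     for sec in sections:
--         if sec[0].startswith(sname):
--             block += sec
--         elif block:
--             break
--     return '\n'.join(line[12:] for line in block)
-- ===== Notes on version B (the rewrite author's own statement) =====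
-- stated objective: alternative
-- what changed: B first parses the whole record into a list of sections (header line plus its run of space-indented continuation lines) and then concatenates the leading run of sections whose header starts with sname, replacing A's single flag-and-break state machine over raw lines with a parse-then-select pipeline over an intermediate section structure.
-- outside the precondition, e.g. on get_kegg_section('TOP\n AAAAAAAAAAAAXXX\nEND', ' A'): A returns 'AXXX', B returns ''
import Mathlib
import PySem

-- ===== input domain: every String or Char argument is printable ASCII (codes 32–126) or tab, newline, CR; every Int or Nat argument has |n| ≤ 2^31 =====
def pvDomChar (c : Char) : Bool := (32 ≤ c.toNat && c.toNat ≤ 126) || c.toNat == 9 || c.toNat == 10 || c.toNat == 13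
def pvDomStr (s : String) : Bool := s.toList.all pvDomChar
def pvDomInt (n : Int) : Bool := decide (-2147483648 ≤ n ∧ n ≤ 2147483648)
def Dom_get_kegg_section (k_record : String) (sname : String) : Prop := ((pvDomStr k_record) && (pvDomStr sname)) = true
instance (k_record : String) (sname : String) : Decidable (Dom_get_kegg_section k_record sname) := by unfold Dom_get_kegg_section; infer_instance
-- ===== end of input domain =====

-- B parses the record into a list of sections (header + indented continuation lines) first and
-- then concatenates the leading run of matching sections, instead of A's flag-and-break state
-- machine over raw lines; objective: alternative (same cost, different decomposition).

-- ===== PORT A =====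
-- the for-loop of A: state = (in_section, section accumulator); returning the accumulator models `break`
def keggLoopA (sname : String) : List String → Bool → List String → List String
  | [], _, acc => acc
  | l :: rest, ins, acc =>
    if PySem.Str.startswith l sname then keggLoopA sname rest true (acc ++ [l])
    else if ins && PySem.Str.startswith l " " then keggLoopA sname rest ins (acc ++ [l])
    else if ins && !PySem.Str.startswith l " " then acc
    else keggLoopA sname rest ins acc

def get_kegg_section (k_record : String) (sname : String) : String :=
  let sec := keggLoopA sname (PySem.Str.splitlines k_record) false []
  let sectionlines := sec.map (fun line => PySem.Str.slice line (some 12) none)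
  PySem.Str.join "\n" sectionlines

-- ===== PORT B =====
-- inner while of B's parser: number of leading lines starting with ' '
def keggTakeIndent : List String → Nat
  | [] => 0
  | l :: rest => if PySem.Str.startswith l " " then keggTakeIndent rest + 1 else 0

-- outer while of B's parser: split the lines into sections (header + its indented run)
def keggSections : List String → List (List String)
  | [] => []
  | l :: rest =>
      (l :: rest.take (keggTakeIndent rest)) :: keggSections (rest.drop (keggTakeIndent rest))
termination_by ls => ls.length
decreasing_by
  have := List.length_drop (l := rest) (i := keggTakeIndent rest)
  simp only [List.length_cons]
  omega

-- B's selection loop over sections; `break` returns the block accumulated so far.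
-- sec[0] in Source B: every section produced by the parser is nonempty, so headD "" is exact there.
def keggSelect (sname : String) : List (List String) → List String → List String
  | [], block => block
  | sec :: rest, block =>
    if PySem.Str.startswith (sec.headD "") sname then keggSelect sname rest (block ++ sec)
    else if !block.isEmpty then block
    else keggSelect sname rest block

def get_kegg_section_alt (k_record : String) (sname : String) : String :=
  let sections := keggSections (PySem.Str.splitlines k_record)
  let block := keggSelect sname sections []
  PySem.Str.join "\n" (block.map (fun line => PySem.Str.slice line (some 12) none))

-- ===== PRECONDITION & SPEC =====
-- Pre_ excludes sname beginning with a space while some record line matches it: there A's prefix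
-- test fires on indented continuation lines, where 'the section named sname' is not well defined —
-- A collects from such a line, B (which only matches section headers) finds no section; both are
-- defensible. (If no line matches, or the very first line matches, the two agree and the input is kept.)
def Pre_get_kegg_section (k_record : String) (sname : String) : Prop :=
  PySem.Str.startswith sname " " = false ∨
    (∀ l ∈ PySem.Str.splitlines k_record, PySem.Str.startswith l sname = false) ∨
    (PySem.Str.splitlines k_record).head?.any (fun l => PySem.Str.startswith l sname) = true
instance (k_record : String) (sname : String) : Decidable (Pre_get_kegg_section k_record sname) := by
  unfold Pre_get_kegg_section; infer_instance

def pvWitness_get_kegg_section : String × String :=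
  ("ENTRY       C00001\nNAME        Water\n            H2O\nEXIT        x", "NAME")

def Spec_get_kegg_section (k_record : String) (sname : String) (out : String) : Prop := out = get_kegg_section_alt k_record sname
instance (k_record : String) (sname : String) (out : String) : Decidable (Spec_get_kegg_section k_record sname out) := by unfold Spec_get_kegg_section; infer_instance

-- ===== CLAIM (what is proved, stated in full; the proofs are below) =====
def Claim_equal_get_kegg_section : Prop := ∀ (k_record : String) (sname : String), Dom_get_kegg_section k_record sname → Pre_get_kegg_section k_record sname → Spec_get_kegg_section k_record sname (get_kegg_section k_record sname)

-- ===== LEMMAS AND PROOFS =====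

-- proof-side helpers: a closed form for A's loop
def keggFindStart (sname : String) : List String → Nat
  | [] => 0
  | l :: rest => if PySem.Str.startswith l sname then 0 else keggFindStart sname rest + 1

def keggBlockLen (sname : String) : List String → Nat
  | [] => 0
  | l :: rest =>
    if PySem.Str.startswith l sname || PySem.Str.startswith l " " then keggBlockLen sname rest + 1
    else 0

-- in-section phase of A = take of the block length
theorem keggLoopA_true (sname : String) (lines : List String) :
    ∀ acc, keggLoopA sname lines true acc = acc ++ lines.take (keggBlockLen sname lines) := by
  induction lines with
  | nil => intro acc; simp [keggLoopA, keggBlockLen]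
  | cons l rest ih =>
    intro acc
    by_cases h1 : PySem.Chars.startswith l.toList sname.toList = true
    · simp [keggLoopA, keggBlockLen, h1, ih]
    · by_cases h2 : PySem.Chars.startswith l.toList [' '] = true
      · simp [keggLoopA, keggBlockLen, h1, h2, ih]
      · simp [keggLoopA, keggBlockLen, h1, h2]

-- scanning phase of A = drop to the start index, then the in-section phase
theorem keggLoopA_false (sname : String) (lines : List String) :
    ∀ acc, keggLoopA sname lines false acc =
      acc ++ (lines.drop (keggFindStart sname lines)).take
        (keggBlockLen sname (lines.drop (keggFindStart sname lines))) := by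
  induction lines with
  | nil => intro acc; simp [keggLoopA, keggFindStart]
  | cons l rest ih =>
    intro acc
    by_cases h1 : PySem.Chars.startswith l.toList sname.toList = true
    · simp [keggLoopA, keggFindStart, keggBlockLen, h1, keggLoopA_true]
    · simp [keggLoopA, keggFindStart, h1, ih]

-- every string starts with the empty string
theorem sw_empty (l : String) : PySem.Str.startswith l "" = true := by
  simp [PySem.Chars.startswith_iff]

-- under Pre_, an indented line never starts with a nonempty sname (char-list core)
theorem sw_indent_chars (sn lt : List Char) (hpre : ¬ ([' '] <+: sn)) (hl : [' '] <+: lt)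
    (hsn : sn ≠ []) : ¬ (sn <+: lt) := by
  intro h
  obtain ⟨t, rfl⟩ := hl
  cases sn with
  | nil => exact hsn rfl
  | cons c s =>
    rcases h with ⟨u, hu⟩
    injection hu with h1 h2
    subst h1
    exact hpre ⟨s, rfl⟩

-- string wrapper
theorem sw_indent (sname l : String) (hpre : PySem.Str.startswith sname " " = false)
    (hl : PySem.Str.startswith l " " = true) (hsn : sname ≠ "") :
    PySem.Str.startswith l sname = false := by
  have hsn' : sname.toList ≠ [] := fun hh => hsn (by simpa using congrArg String.ofList hh)
  have hpre' : ¬ ([' '] <+: sname.toList) := by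
    intro hp
    have : PySem.Str.startswith sname " " = true := by
      simpa [PySem.Chars.startswith_iff] using hp
    rw [this] at hpre
    exact absurd hpre (by simp)
  have hl' : [' '] <+: l.toList := by simpa [PySem.Chars.startswith_iff] using hl
  rw [Bool.eq_false_iff]
  intro h
  have h' : sname.toList <+: l.toList := by simpa [PySem.Chars.startswith_iff] using h
  exact sw_indent_chars sname.toList l.toList hpre' hl' hsn' h'

-- keggTakeIndent counts at most all of the list
theorem keggTakeIndent_le (ls : List String) : keggTakeIndent ls ≤ ls.length := by
  induction ls with
  | nil => simp [keggTakeIndent]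
  | cons l rest ih =>
    rw [keggTakeIndent]
    split <;> simp only [List.length_cons] <;> omega

-- all lines counted by keggTakeIndent are indented
theorem take_keggTakeIndent (ls : List String) :
    ∀ b ∈ ls.take (keggTakeIndent ls), PySem.Str.startswith b " " = true := by
  induction ls with
  | nil => simp
  | cons l rest ih =>
    intro b hb
    by_cases h : PySem.Str.startswith l " " = true
    · rw [keggTakeIndent, if_pos h, List.take_succ_cons, List.mem_cons] at hb
      rcases hb with rfl | hb
      · exact h
      · exact ih b hb
    · rw [keggTakeIndent, if_neg h] at hb
      simp at hb

-- the first line after the indented run is not indented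
theorem drop_keggTakeIndent (ls : List String) :
    ∀ l t, ls.drop (keggTakeIndent ls) = l :: t → PySem.Str.startswith l " " = false := by
  induction ls with
  | nil => simp
  | cons a rest ih =>
    intro l t h
    by_cases ha : PySem.Str.startswith a " " = true
    · rw [keggTakeIndent, if_pos ha, List.drop_succ_cons] at h
      exact ih l t h
    · rw [keggTakeIndent, if_neg ha, List.drop_zero] at h
      injection h with h1 h2
      subst h1
      exact Bool.eq_false_iff.mpr ha

-- keggBlockLen skips over a fully indented body
theorem keggBlockLen_append (sname : String) (body rest : List String)
    (hb : ∀ b ∈ body, PySem.Str.startswith b " " = true) :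
    keggBlockLen sname (body ++ rest) = body.length + keggBlockLen sname rest := by
  induction body with
  | nil => simp
  | cons b body ih =>
    have hb0 : PySem.Chars.startswith b.toList [' '] = true := by simpa using hb b (by simp)
    rw [List.cons_append, keggBlockLen, if_pos (by simp [hb0]), List.length_cons,
      ih (fun x hx => hb x (by simp [hx]))]
    omega

-- keggFindStart skips over a fully indented body (sname nonempty, Pre_)
theorem keggFindStart_append (sname : String) (body rest : List String)
    (hpre : PySem.Str.startswith sname " " = false) (hsn : sname ≠ "")
    (hb : ∀ b ∈ body, PySem.Str.startswith b " " = true) :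
    keggFindStart sname (body ++ rest) = body.length + keggFindStart sname rest := by
  induction body with
  | nil => simp
  | cons b body ih =>
    have hb0 : PySem.Chars.startswith b.toList sname.toList = false := by
      simpa using sw_indent sname b hpre (hb b (by simp)) hsn
    rw [List.cons_append, keggFindStart, if_neg (by simp [hb0]), List.length_cons,
      ih (fun x hx => hb x (by simp [hx]))]
    omega

-- the block A takes from a matching header line = this whole section ++ the block of the remainder
theorem kegg_take_block (sname l : String) (rest : List String)
    (hm : PySem.Str.startswith l sname = true) :
    (l :: rest).take (keggBlockLen sname (l :: rest)) =
      (l :: rest.take (keggTakeIndent rest)) ++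
        (rest.drop (keggTakeIndent rest)).take
          (keggBlockLen sname (rest.drop (keggTakeIndent rest))) := by
  have hm' : PySem.Chars.startswith l.toList sname.toList = true := by simpa using hm
  have hlen : (rest.take (keggTakeIndent rest)).length = keggTakeIndent rest :=
    List.length_take_of_le (keggTakeIndent_le rest)
  have hbl : keggBlockLen sname (l :: rest) =
      keggTakeIndent rest + keggBlockLen sname (rest.drop (keggTakeIndent rest)) + 1 := by
    rw [keggBlockLen, if_pos (by simp [hm'])]
    conv_lhs => rw [show rest = rest.take (keggTakeIndent rest) ++ rest.drop (keggTakeIndent rest)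
      from (List.take_append_drop _ rest).symm]
    rw [keggBlockLen_append sname _ _ (take_keggTakeIndent rest), hlen]
  rw [hbl, List.take_succ_cons, List.take_add, List.cons_append]

-- where A skips a non-matching header, it skips the whole section
theorem kegg_drop_find (sname l : String) (rest : List String)
    (hpre : PySem.Str.startswith sname " " = false)
    (hm : PySem.Str.startswith l sname = false) :
    (l :: rest).drop (keggFindStart sname (l :: rest)) =
      (rest.drop (keggTakeIndent rest)).drop
        (keggFindStart sname (rest.drop (keggTakeIndent rest))) := by
  have hm' : PySem.Chars.startswith l.toList sname.toList = false := by simpa using hm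
  have hsn : sname ≠ "" := by
    intro h; rw [h, sw_empty l] at hm; exact absurd hm (by simp)
  rw [keggFindStart, if_neg (by simp [hm']), List.drop_succ_cons]
  conv_lhs => rw [show rest = rest.take (keggTakeIndent rest) ++ rest.drop (keggTakeIndent rest)
    from (List.take_append_drop _ rest).symm]
  rw [keggFindStart_append sname _ _ hpre hsn (take_keggTakeIndent rest), List.drop_append,
    List.drop_eq_nil_of_le (Nat.le_add_right _ _), Nat.add_sub_cancel_left, List.nil_append]

-- collect phase: once the block is nonempty, B's selection = take of A's block length
theorem keggSelect_started (sname : String) :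
    ∀ ls : List String, (∀ l t, ls = l :: t → PySem.Str.startswith l " " = false) →
      ∀ block : List String, block ≠ [] →
        keggSelect sname (keggSections ls) block = block ++ ls.take (keggBlockLen sname ls) := by
  intro ls
  induction ls using keggSections.induct with
  | case1 => intro _ block _; simp [keggSections, keggSelect, keggBlockLen]
  | case2 l rest ih =>
    intro hhead block hblock
    rw [keggSections]
    by_cases hm : PySem.Str.startswith l sname = true
    · rw [keggSelect, List.headD_cons, if_pos hm,
        ih (drop_keggTakeIndent rest) _ (by simp), kegg_take_block sname l rest hm,
        List.append_assoc]
    · have hind : PySem.Str.startswith l " " = false := hhead l rest rfl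
      have hm' : PySem.Chars.startswith l.toList sname.toList = false := by
        simpa using Bool.eq_false_iff.mpr hm
      have hind' : PySem.Chars.startswith l.toList [' '] = false := by simpa using hind
      rw [keggSelect, List.headD_cons, if_neg (by simp [hm']),
        if_pos (by simp [hblock]),
        keggBlockLen, if_neg (by simp [hm', hind'])]
      simp

-- scan phase: B's selection with empty block = A's closed form
theorem keggSelect_scan (sname : String)
    (hpre : PySem.Str.startswith sname " " = false) :
    ∀ ls : List String,
      keggSelect sname (keggSections ls) [] =
        (ls.drop (keggFindStart sname ls)).take
          (keggBlockLen sname (ls.drop (keggFindStart sname ls))) := by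
  intro ls
  induction ls using keggSections.induct with
  | case1 => simp [keggSections, keggSelect, keggFindStart, keggBlockLen]
  | case2 l rest ih =>
    rw [keggSections]
    by_cases hm : PySem.Str.startswith l sname = true
    · rw [keggSelect, List.headD_cons, if_pos hm,
        keggSelect_started sname _ (drop_keggTakeIndent rest) _ (by simp),
        List.nil_append, keggFindStart, if_pos hm, List.drop_zero,
        kegg_take_block sname l rest hm]
    · have hm2 : PySem.Str.startswith l sname = false := Bool.eq_false_iff.mpr hm
      have hm' : PySem.Chars.startswith l.toList sname.toList = false := by simpa using hm2
      rw [keggSelect, List.headD_cons, if_neg (by simp [hm']), if_neg (by simp),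
        ih, kegg_drop_find sname l rest hpre hm2]

-- when no line matches sname, A finds no start
theorem keggFindStart_all (sname : String) (ls : List String)
    (h : ∀ l ∈ ls, PySem.Str.startswith l sname = false) :
    keggFindStart sname ls = ls.length := by
  induction ls with
  | nil => rfl
  | cons l rest ih =>
    have h0 : PySem.Chars.startswith l.toList sname.toList = false := by simpa using h l (by simp)
    rw [keggFindStart, if_neg (by simp [h0]), ih (fun x hx => h x (by simp [hx]))]
    rfl

-- when no line matches sname, B selects nothing
theorem keggSelect_all (sname : String) (ls : List String)
    (h : ∀ l ∈ ls, PySem.Str.startswith l sname = false) :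
    keggSelect sname (keggSections ls) [] = [] := by
  induction ls using keggSections.induct with
  | case1 => simp [keggSections, keggSelect]
  | case2 l rest ih =>
    have h0 : PySem.Chars.startswith l.toList sname.toList = false := by simpa using h l (by simp)
    rw [keggSections, keggSelect, List.headD_cons, if_neg (by simp [h0]),
      if_neg (by simp)]
    exact ih (fun x hx => h x (by simp [List.mem_of_mem_drop hx]))

-- a record whose first line matches sname: A and B agree with no hypothesis on sname
theorem kegg_head_match (sname l : String) (rest : List String)
    (hm : PySem.Str.startswith l sname = true) :
    keggSelect sname (keggSections (l :: rest)) [] =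
      ((l :: rest).drop (keggFindStart sname (l :: rest))).take
        (keggBlockLen sname ((l :: rest).drop (keggFindStart sname (l :: rest)))) := by
  rw [keggSections, keggSelect, List.headD_cons, if_pos hm,
    keggSelect_started sname _ (drop_keggTakeIndent rest) _ (by simp),
    List.nil_append, keggFindStart, if_pos hm, List.drop_zero,
    kegg_take_block sname l rest hm]

-- ===== VERDICT (by name: the statement is the Claim_ definition above) =====
theorem get_kegg_section_spec : Claim_equal_get_kegg_section := by
  intro k_record sname _ hpre
  unfold Pre_get_kegg_section at hpre
  unfold Spec_get_kegg_section get_kegg_section get_kegg_section_alt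
  rcases hpre with hpre | hnone | hhead
  · simp only [keggLoopA_false, keggSelect_scan sname hpre, List.nil_append]
  · simp only [keggLoopA_false, keggSelect_all sname _ hnone, List.nil_append,
      keggFindStart_all sname _ hnone, List.drop_length, List.take_nil]
  · rcases hls : PySem.Str.splitlines k_record with _ | ⟨l, rest⟩
    · rw [hls] at hhead; simp at hhead
    · rw [hls] at hhead
      simp only [List.head?_cons, Option.any_some] at hhead
      simp only [keggLoopA_false]
      rw [kegg_head_match sname l rest hhead, List.nil_append]
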